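-- pv_equiv track=rewrite | github.com/Thespiann/- | askisi6.py | samediag
-- ===== SOURCE A (Python) =====
-- def samediag(x,y):
--     samediags=[]
--     for i in range(8):
--         for j in range(8):
--             if i+j==x+y:
--                 samediags.append([i,j])
--             if i-j==x-y:
--                 samediags.append([i,j])
--     return samediags
-- ===== SOURCE B (Python) =====
-- def _row(i, ja, jm):
--     av = 0 <= ja < 8
--     mv = 0 <= jm < 8
--     if av and mv:
--         if jm < ja:
--             return [[i, jm], [i, ja]]
--         return [[i, ja], [i, jm]]  # ja < jm, or ja == jm (point hit twice: anti then main)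
--     if av:
--         return [[i, ja]]
--     if mv:
--         return [[i, jm]]
--     return []
--
-- def samediag(x, y):
--     s, d = x + y, x - y
--     res = []
--     for i in range(8):
--         res += _row(i, s - i, i - d)
--     return res
-- ===== Notes on version B (the rewrite author's own statement) =====
-- stated objective: faster
-- what changed: Instead of scanning all 64 board cells and testing both diagonal conditions at each, B loops only over the 8 rows and directly computes the anti-diagonal column x+y-i and the main-diagonal column i-x+y, emitting the valid one(s) in A's per-row order (smaller column first, anti-diagonal before main at the point itself).
import Mathlib
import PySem

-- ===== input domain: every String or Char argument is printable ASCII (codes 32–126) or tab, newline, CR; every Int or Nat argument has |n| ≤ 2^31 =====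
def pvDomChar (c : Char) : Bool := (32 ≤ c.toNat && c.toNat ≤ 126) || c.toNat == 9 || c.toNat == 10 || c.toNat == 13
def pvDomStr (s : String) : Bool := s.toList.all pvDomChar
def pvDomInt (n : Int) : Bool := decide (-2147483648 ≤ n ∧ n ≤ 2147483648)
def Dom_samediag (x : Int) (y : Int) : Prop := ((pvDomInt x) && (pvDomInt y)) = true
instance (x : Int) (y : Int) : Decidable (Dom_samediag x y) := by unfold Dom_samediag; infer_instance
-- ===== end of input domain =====

-- B replaces A's scan of all 64 board cells by directly computing, per row i, the two
-- candidate columns x+y-i and i-(x-y) (objective: faster by a constant factor — 8 rows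
-- instead of 64 cell tests).

-- ===== PORT A =====
def samediag (x : Int) (y : Int) : List (List Int) :=
  (PySem.List.pyRange 0 8 1).foldl (fun acc i =>
    (PySem.List.pyRange 0 8 1).foldl (fun acc2 j =>
      let acc3 := if i + j = x + y then acc2 ++ [[i, j]] else acc2
      if i - j = x - y then acc3 ++ [[i, j]] else acc3) acc) []

-- ===== PORT B =====
def samediagRow (i : Int) (ja : Int) (jm : Int) : List (List Int) :=
  if 0 ≤ ja ∧ ja < 8 then
    if 0 ≤ jm ∧ jm < 8 then
      if jm < ja then [[i, jm], [i, ja]]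
      else [[i, ja], [i, jm]]
    else [[i, ja]]
  else if 0 ≤ jm ∧ jm < 8 then [[i, jm]]
  else []

def samediag_alt (x : Int) (y : Int) : List (List Int) :=
  let s := x + y
  let d := x - y
  (PySem.List.pyRange 0 8 1).foldl (fun res i => res ++ samediagRow i (s - i) (i - d)) []

-- ===== PRECONDITION & SPEC =====
def Spec_samediag (x : Int) (y : Int) (out : List (List Int)) : Prop := out = samediag_alt x y
instance (x : Int) (y : Int) (out : List (List Int)) : Decidable (Spec_samediag x y out) := by unfold Spec_samediag; infer_instance

-- ===== CLAIM (what is proved, stated in full; the proofs are below) =====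
def Claim_equal_samediag : Prop := ∀ (x : Int) (y : Int), Dom_samediag x y → Spec_samediag x y (samediag x y)

-- ===== LEMMAS AND PROOFS =====

lemma pyRange8 : PySem.List.pyRange 0 8 1 = [0, 1, 2, 3, 4, 5, 6, 7] := by decide

-- the two entries A's inner loop appends at cell (i, j)
def pvCell (i ja jm j : Int) : List (List Int) :=
  (if j = ja then [[i, j]] else []) ++ (if j = jm then [[i, j]] else [])

lemma pvCell_noAnti (i t u : Int) (h : ¬(0 ≤ t ∧ t < 8)) (j : Int) (h1 : 0 ≤ j) (h2 : j < 8) :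
    pvCell i t u j = (if j = u then [[i, j]] else []) := by
  unfold pvCell
  rw [if_neg (by omega)]
  simp

lemma pvCell_noMain (i t u : Int) (h : ¬(0 ≤ u ∧ u < 8)) (j : Int) (h1 : 0 ≤ j) (h2 : j < 8) :
    pvCell i t u j = (if j = t then [[i, j]] else []) := by
  unfold pvCell
  rw [if_neg (show ¬j = u by omega)]
  simp

-- A's step at cell (i, j), written as an append of pvCell
lemma pvStep_eq (x y i j : Int) (acc2 : List (List Int)) :
    (let acc3 := if i + j = x + y then acc2 ++ [[i, j]] else acc2
     if i - j = x - y then acc3 ++ [[i, j]] else acc3)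
    = acc2 ++ pvCell i (x + y - i) (i - (x - y)) j := by
  unfold pvCell
  split_ifs <;> first | omega | simp

set_option maxHeartbeats 1000000 in
-- all entries A's inner loop collects in row i equal B's directly computed row
lemma pvRow_eq (i ja jm : Int) :
    ([0, 1, 2, 3, 4, 5, 6, 7] : List Int).flatMap (pvCell i ja jm) = samediagRow i ja jm := by
  by_cases hja : 0 ≤ ja ∧ ja < 8
  · by_cases hjm : 0 ≤ jm ∧ jm < 8
    · obtain ⟨h1, h2⟩ := hja; obtain ⟨h3, h4⟩ := hjm
      interval_cases ja <;> interval_cases jm <;> simp [samediagRow, pvCell]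
    · obtain ⟨h1, h2⟩ := hja
      rw [samediagRow, if_pos ⟨h1, h2⟩, if_neg hjm]
      simp [pvCell_noMain i ja jm hjm]
      interval_cases ja <;> simp
  · rw [samediagRow, if_neg hja]
    by_cases hjm : 0 ≤ jm ∧ jm < 8
    · obtain ⟨h3, h4⟩ := hjm
      rw [if_pos ⟨h3, h4⟩]
      simp [pvCell_noAnti i ja jm hja]
      interval_cases jm <;> simp
    · rw [if_neg hjm]
      simp [pvCell_noAnti i ja jm hja, show ∀ j : Int, 0 ≤ j → j < 8 → ¬j = jm by
        omega]

lemma inner_eq (x y i : Int) (acc : List (List Int)) :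
    (PySem.List.pyRange 0 8 1).foldl (fun acc2 j =>
      let acc3 := if i + j = x + y then acc2 ++ [[i, j]] else acc2
      if i - j = x - y then acc3 ++ [[i, j]] else acc3) acc
    = acc ++ samediagRow i (x + y - i) (i - (x - y)) := by
  calc (PySem.List.pyRange 0 8 1).foldl (fun acc2 j =>
          let acc3 := if i + j = x + y then acc2 ++ [[i, j]] else acc2
          if i - j = x - y then acc3 ++ [[i, j]] else acc3) acc
      = (PySem.List.pyRange 0 8 1).foldl
          (fun acc2 j => acc2 ++ pvCell i (x + y - i) (i - (x - y)) j) acc :=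
        PySem.List.foldl_congr_mem _ _ _ _ (fun acc2 j _ => pvStep_eq x y i j acc2)
    _ = acc ++ (PySem.List.pyRange 0 8 1).flatMap (pvCell i (x + y - i) (i - (x - y))) :=
        PySem.List.foldl_append_eq_flatMap _ _ _
    _ = acc ++ samediagRow i (x + y - i) (i - (x - y)) := by rw [pyRange8, pvRow_eq]

-- ===== VERDICT (by name: the statement is the Claim_ definition above) =====
theorem samediag_spec : Claim_equal_samediag := by
  intro x y _
  unfold Spec_samediag samediag samediag_alt
  exact PySem.List.foldl_congr_mem _ _ _ _ (fun acc i _ => inner_eq x y i acc)
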